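-- pv_equiv track=rewrite | github.com/jackytck/checkio | CakesRows.py | checkio
-- ===== SOURCE A (Python) =====
-- import itertools
--
-- def orient(p, q, r):
--     px, py = p
--     qx, qy = q
--     rx, ry = r
--     return qx * ry - qy * rx - (px * ry - py * rx) + px * qy - py * qx
--
-- def len2(p, q):
--     px, py = p
--     qx, qy = q
--     return (px - qx) ** 2 + (py - qy) ** 2
--
-- def checkio(cakes):
--     cnt = 0
--     n = len(cakes)
--     segments = []
--     ids = [set() for i in range(n)]
--
--     #for each nC2 segment, find its length, and other points that are collinear to it
--     for s in itertools.combinations(range(n), 2):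
--         p, q = cakes[s[0]], cakes[s[1]]
--         collinear = []
--         for i in range(n):
--             if i not in s:
--                 r = cakes[i]
--                 if orient(p, q, r) == 0:
--                     collinear.append(i)
--         if collinear:
--             segments.append((s, len2(p, q), collinear))
--
--     #sort by length descendingly
--     segments.sort(key = lambda x: x[1], reverse = True)
--
--     #assign id(s) to each point, same id for the whole segment
--     for s in segments:
--         p_ids, q_ids = ids[s[0][0]], ids[s[0][1]]
--
--         #ignore sub-segment
--         if p_ids and q_ids and p_ids.intersection(q_ids):
--             continue
--
--         #found new segment
--         p_ids.add(cnt)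
--         q_ids.add(cnt)
--         for r in s[2]:
--             ids[r].add(cnt)
--         cnt += 1
--
--     return cnt
-- ===== SOURCE B (Python) =====
-- def orient(p, q, r):
--     px, py = p
--     qx, qy = q
--     rx, ry = r
--     return qx * ry - qy * rx - (px * ry - py * rx) + px * qy - py * qx
--
-- def checkio(cakes):
--     n = len(cakes)
--     rows = set()
--     for i in range(n):
--         for j in range(i + 1, n):
--             if cakes[i] != cakes[j]:
--                 pts = tuple(k for k in range(n)
--                             if orient(cakes[i], cakes[j], cakes[k]) == 0)
--                 if len(pts) >= 3:
--                     rows.add(pts)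
--     return len(rows)
-- ===== Notes on version B (the rewrite author's own statement) =====
-- stated objective: simpler
-- what changed: B drops A's segment list, descending length sort and greedy id-assignment with per-point id sets, and instead collects, for each pair of distinct points, the tuple of all indices collinear with the pair into a set, returning the number of distinct tuples of size >= 3.
-- intended difference: On lists of >= 3 copies of one single point A returns 1 (its zero-length degenerate segment is counted as a row) while B returns 0, the intended count: no line through 3 distinct cake positions exists there. — e.g. on checkio([(0, 0), (0, 0), (0, 0)]): A returns 1, B returns 0
import Mathlib
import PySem

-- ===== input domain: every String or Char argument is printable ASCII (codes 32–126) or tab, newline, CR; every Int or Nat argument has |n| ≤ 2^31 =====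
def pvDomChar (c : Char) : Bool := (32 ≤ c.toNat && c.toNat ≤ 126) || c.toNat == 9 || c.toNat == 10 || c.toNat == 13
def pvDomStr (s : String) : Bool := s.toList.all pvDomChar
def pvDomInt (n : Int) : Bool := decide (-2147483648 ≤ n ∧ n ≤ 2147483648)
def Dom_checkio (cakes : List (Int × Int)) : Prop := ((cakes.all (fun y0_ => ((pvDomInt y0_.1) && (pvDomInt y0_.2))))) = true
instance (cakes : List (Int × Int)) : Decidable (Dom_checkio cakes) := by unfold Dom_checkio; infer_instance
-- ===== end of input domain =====

-- B replaces A's sort-by-length + greedy id-assignment machinery by a direct dedup of the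
-- collinear index tuples of the rows (objective: simpler).

-- ===== PORT A =====
def pvOrient (p q r : Int × Int) : Int :=
  q.1 * r.2 - q.2 * r.1 - (p.1 * r.2 - p.2 * r.1) + p.1 * q.2 - p.2 * q.1

def pvLen2 (p q : Int × Int) : Int :=
  (p.1 - q.1) ^ 2 + (p.2 - q.2) ^ 2

-- itertools.combinations(range(n), 2): the pairs (i, j), 0 ≤ i < j < n, in lexicographic
-- order (exact: combinations of an increasing range)
def pvComb2 (n : Int) : List (Int × Int) :=
  (PySem.List.pyRange 0 n 1).flatMap fun i =>
    (PySem.List.pyRange (i + 1) n 1).map fun j => (i, j)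

-- A's first loop: build the segments list
def pvSegments (cakes : List (Int × Int)) : List ((Int × Int) × Int × List Int) :=
  (pvComb2 (PySem.List.len cakes)).foldl
    (fun segments s =>
      let p := PySem.List.pyGetD cakes s.1 (0, 0)
      let q := PySem.List.pyGetD cakes s.2 (0, 0)
      let collinear := (PySem.List.pyRange 0 (PySem.List.len cakes) 1).foldl
        (fun acc i =>
          if ¬ (i = s.1 ∨ i = s.2) then
            if pvOrient p q (PySem.List.pyGetD cakes i (0, 0)) = 0 then acc ++ [i] else acc
          else acc) []
      if collinear ≠ [] then segments ++ [(s, pvLen2 p q, collinear)] else segments)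
    []

-- A's second loop body: the greedy id assignment for one segment
def pvStep (st : Int × List (PySem.Set Int)) (s : (Int × Int) × Int × List Int) :
    Int × List (PySem.Set Int) :=
  let cnt := st.1
  let ids := st.2
  let pids := PySem.List.pyGetD ids s.1.1 PySem.Set.empty
  let qids := PySem.List.pyGetD ids s.1.2 PySem.Set.empty
  if pids ≠ PySem.Set.empty ∧ qids ≠ PySem.Set.empty ∧
      PySem.Set.inter pids qids ≠ PySem.Set.empty then st
  else
    let ids1 := PySem.List.pySetD ids s.1.1 (PySem.Set.add pids cnt)
    let ids2 := PySem.List.pySetD ids1 s.1.2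
      (PySem.Set.add (PySem.List.pyGetD ids1 s.1.2 PySem.Set.empty) cnt)
    let ids3 := s.2.2.foldl
      (fun acc r => PySem.List.pySetD acc r
        (PySem.Set.add (PySem.List.pyGetD acc r PySem.Set.empty) cnt)) ids2
    (cnt + 1, ids3)

def checkio (cakes : List (Int × Int)) : Int :=
  let n := PySem.List.len cakes
  let ids : List (PySem.Set Int) := List.replicate n.toNat PySem.Set.empty
  let segments := PySem.List.sorted (pvSegments cakes) (fun x => x.2.1) true
  (segments.foldl pvStep (0, ids)).1

-- ===== PORT B =====
def checkio_alt (cakes : List (Int × Int)) : Int :=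
  let n := PySem.List.len cakes
  let rows : PySem.Set (List Int) :=
    (PySem.List.pyRange 0 n 1).foldl (fun rows i =>
      (PySem.List.pyRange (i + 1) n 1).foldl (fun rows j =>
        if PySem.List.pyGetD cakes i (0, 0) ≠ PySem.List.pyGetD cakes j (0, 0) then
          let pts := (PySem.List.pyRange 0 n 1).filter
            (fun k => pvOrient (PySem.List.pyGetD cakes i (0, 0))
              (PySem.List.pyGetD cakes j (0, 0)) (PySem.List.pyGetD cakes k (0, 0)) = 0)
          if 3 ≤ PySem.List.len pts then PySem.Set.add rows pts else rows
        else rows) rows)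
      PySem.Set.empty
  PySem.Set.len rows

-- ===== PRECONDITION & SPEC =====
-- On lists of ≥3 copies of one single point A returns 1 (its zero-length degenerate segment
-- counts as a row) while B returns 0, the intended count: no line through 3 cake positions exists.
def D_checkio (cakes : List (Int × Int)) : Prop :=
  3 ≤ cakes.length ∧ ∀ p ∈ cakes, p = cakes.getD 0 (0, 0)
instance (cakes : List (Int × Int)) : Decidable (D_checkio cakes) := by
  unfold D_checkio; infer_instance

def Spec_checkio (cakes : List (Int × Int)) (out : Int) : Prop :=
  ¬ D_checkio cakes → out = checkio_alt cakes
instance (cakes : List (Int × Int)) (out : Int) : Decidable (Spec_checkio cakes out) := by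
  unfold Spec_checkio; infer_instance

def pvDiffWitness_checkio : (List (Int × Int)) := [(0, 0), (0, 0), (0, 0)]
def pvDiffWitnessOut_checkio : Int × Int := (1, 0)

-- ===== CLAIM (what is proved, stated in full; the proofs are below) =====
def Claim_unchanged_checkio : Prop :=
  ∀ (cakes : List (Int × Int)), Dom_checkio cakes → Spec_checkio cakes (checkio cakes)
def Claim_changed_checkio : Prop :=
  Dom_checkio (pvDiffWitness_checkio) ∧ D_checkio (pvDiffWitness_checkio) ∧
  checkio (pvDiffWitness_checkio) = pvDiffWitnessOut_checkio.1 ∧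
  checkio_alt (pvDiffWitness_checkio) = pvDiffWitnessOut_checkio.2 ∧
  pvDiffWitnessOut_checkio.1 ≠ pvDiffWitnessOut_checkio.2
def Claim_exact_checkio : Prop :=
  ∀ (cakes : List (Int × Int)), Dom_checkio cakes → D_checkio cakes →
    checkio cakes ≠ checkio_alt cakes

-- ===== LEMMAS AND PROOFS =====

-- ---- proof-side abbreviations ----
def pvV (cakes : List (Int × Int)) (k : Int) : Int × Int := PySem.List.pyGetD cakes k (0, 0)

def pvPts (cakes : List (Int × Int)) (i j : Int) : List Int :=
  (PySem.List.pyRange 0 (PySem.List.len cakes) 1).filter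
    (fun k => pvOrient (pvV cakes i) (pvV cakes j) (pvV cakes k) = 0)

def pvColl (cakes : List (Int × Int)) (i j : Int) : List Int :=
  (PySem.List.pyRange 0 (PySem.List.len cakes) 1).filter
    (fun k => ¬(k = i ∨ k = j) ∧ pvOrient (pvV cakes i) (pvV cakes j) (pvV cakes k) = 0)

def pvSegOf (cakes : List (Int × Int)) (s : Int × Int) : (Int × Int) × Int × List Int :=
  (s, pvLen2 (pvV cakes s.1) (pvV cakes s.2), pvColl cakes s.1 s.2)

def pvValid (cakes : List (Int × Int)) (i j : Int) : Prop :=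
  0 ≤ i ∧ i < j ∧ j < (cakes.length : Int) ∧ pvV cakes i ≠ pvV cakes j ∧ pvColl cakes i j ≠ []

def pvCand (cakes : List (Int × Int)) : List (List Int) :=
  ((pvComb2 (PySem.List.len cakes)).filter
      (fun s => pvV cakes s.1 ≠ pvV cakes s.2 ∧ 3 ≤ PySem.List.len (pvPts cakes s.1 s.2))).map
    (fun s => pvPts cakes s.1 s.2)

-- ---- geometry ----
theorem orient_self_left (p q : Int × Int) : pvOrient p q p = 0 := by
  simp only [pvOrient]; ring

theorem orient_self_right (p q : Int × Int) : pvOrient p q q = 0 := by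
  simp only [pvOrient]; ring

theorem len2_zero (p : Int × Int) : pvLen2 p p = 0 := by simp [pvLen2]

theorem len2_pos (p q : Int × Int) (h : p ≠ q) : 0 < pvLen2 p q := by
  obtain ⟨px, py⟩ := p; obtain ⟨qx, qy⟩ := q
  simp only [pvLen2]
  have hne : px - qx ≠ 0 ∨ py - qy ≠ 0 := by
    by_contra hc; push Not at hc
    exact h (by simp only [Prod.mk.injEq]; omega)
  rcases hne with h' | h'
  · have h2 : 0 < (px - qx) ^ 2 := by positivity
    nlinarith [sq_nonneg (py - qy)]
  · have h2 : 0 < (py - qy) ^ 2 := by positivity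
    nlinarith [sq_nonneg (px - qx)]

theorem orient_trans (p q p' q' r : Int × Int) (hpq : p ≠ q) (hp'q' : p' ≠ q')
    (h1 : pvOrient p' q' p = 0) (h2 : pvOrient p' q' q = 0) :
    (pvOrient p q r = 0 ↔ pvOrient p' q' r = 0) := by
  obtain ⟨px, py⟩ := p; obtain ⟨qx, qy⟩ := q
  obtain ⟨Px, Py⟩ := p'; obtain ⟨Qx, Qy⟩ := q'; obtain ⟨rx, ry⟩ := r
  simp only [pvOrient] at *
  have hu : ¬(qx - px = 0 ∧ qy - py = 0) := fun ⟨h, h'⟩ => by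
    exact hpq (by simp only [Prod.mk.injEq]; omega : (px, py) = (qx, qy))
  have hv : ¬(Qx - Px = 0 ∧ Qy - Py = 0) := fun ⟨h, h'⟩ => by
    exact hp'q' (by simp only [Prod.mk.injEq]; omega : (Px, Py) = (Qx, Qy))
  have huv : (qx - px) * (Qy - Py) - (qy - py) * (Qx - Px) = 0 := by linarith
  have hcs : (qx - px) * (py - Py) - (qy - py) * (px - Px) = 0 := by
    by_cases hv1 : Qx - Px = 0
    · have hv2 : Qy - Py ≠ 0 := fun h => hv ⟨hv1, h⟩
      have h0 : (Qy - Py) * ((qx - px) * (py - Py) - (qy - py) * (px - Px)) = 0 := by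
        linear_combination (qy - py) * h1 + (py - Py) * huv
      rcases mul_eq_zero.mp h0 with h | h
      · exact absurd h hv2
      · exact h
    · have h0 : (Qx - Px) * ((qx - px) * (py - Py) - (qy - py) * (px - Px)) = 0 := by
        linear_combination (qx - px) * h1 + (px - Px) * huv
      rcases mul_eq_zero.mp h0 with h | h
      · exact absurd h hv1
      · exact h
  have eA : (Qx - Px) * (qx * ry - qy * rx - (px * ry - py * rx) + px * qy - py * qx)
      = (qx - px) * (Qx * ry - Qy * rx - (Px * ry - Py * rx) + Px * Qy - Py * Qx) := by
    linear_combination (rx - Px) * huv - (Qx - Px) * hcs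
  have eB : (Qy - Py) * (qx * ry - qy * rx - (px * ry - py * rx) + px * qy - py * qx)
      = (qy - py) * (Qx * ry - Qy * rx - (Px * ry - Py * rx) + Px * Qy - Py * Qx) := by
    linear_combination (ry - Py) * huv - (Qy - Py) * hcs
  constructor
  · intro hA
    by_cases hu1 : qx - px = 0
    · have hu2 : qy - py ≠ 0 := fun h => hu ⟨hu1, h⟩
      have := eB; rw [hA, mul_zero] at this
      rcases mul_eq_zero.mp this.symm with h | h
      · exact absurd h hu2
      · exact h
    · have := eA; rw [hA, mul_zero] at this
      rcases mul_eq_zero.mp this.symm with h | h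
      · exact absurd h hu1
      · exact h
  · intro hB
    by_cases hv1 : Qx - Px = 0
    · have hv2 : Qy - Py ≠ 0 := fun h => hv ⟨hv1, h⟩
      have := eB; rw [hB, mul_zero] at this
      rcases mul_eq_zero.mp this with h | h
      · exact absurd h hv2
      · exact h
    · have := eA; rw [hB, mul_zero] at this
      rcases mul_eq_zero.mp this with h | h
      · exact absurd h hv1
      · exact h

-- ---- characterizations of the ports' loops ----
theorem mem_comb2 (n : Int) (s : Int × Int) :
    s ∈ pvComb2 n ↔ 0 ≤ s.1 ∧ s.1 < s.2 ∧ s.2 < n := by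
  obtain ⟨i, j⟩ := s
  simp only [pvComb2, List.mem_flatMap, List.mem_map, PySem.List.mem_pyRange_one,
    Prod.mk.injEq]
  constructor
  · rintro ⟨a, ⟨ha0, han⟩, b, ⟨hb0, hbn⟩, rfl, rfl⟩; omega
  · rintro ⟨h0, hij, hn⟩; exact ⟨i, by omega, j, by omega, rfl, rfl⟩

theorem segments_eq (cakes : List (Int × Int)) :
    pvSegments cakes =
      ((pvComb2 (PySem.List.len cakes)).filter
        (fun s => pvColl cakes s.1 s.2 ≠ [])).map (pvSegOf cakes) := by
  have hin : ∀ (s : Int × Int) (l : List Int) (acc : List Int),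
      l.foldl (fun acc i =>
        if ¬(i = s.1 ∨ i = s.2) then
          if pvOrient (PySem.List.pyGetD cakes s.1 (0, 0)) (PySem.List.pyGetD cakes s.2 (0, 0))
              (PySem.List.pyGetD cakes i (0, 0)) = 0 then acc ++ [i] else acc
        else acc) acc
      = acc ++ l.filter (fun k => ¬(k = s.1 ∨ k = s.2) ∧
          pvOrient (pvV cakes s.1) (pvV cakes s.2) (pvV cakes k) = 0) := by
    intro s l
    induction l with
    | nil => simp
    | cons x xs ih =>
      intro acc
      rw [List.foldl_cons, List.filter_cons]
      by_cases h1 : x = s.1 ∨ x = s.2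
      · rw [if_neg (by tauto), ih]
        simp [pvV, h1]
      · rw [if_pos h1]
        by_cases h2 : pvOrient (PySem.List.pyGetD cakes s.1 (0, 0))
            (PySem.List.pyGetD cakes s.2 (0, 0)) (PySem.List.pyGetD cakes x (0, 0)) = 0
        · rw [if_pos h2, ih]
          simp [pvV, h1, h2]
        · rw [if_neg h2, ih]
          simp [pvV, h1, h2]
  suffices h : ∀ (l : List (Int × Int)) (init : List ((Int × Int) × Int × List Int)),
      l.foldl (fun segments s =>
        let p := PySem.List.pyGetD cakes s.1 (0, 0)
        let q := PySem.List.pyGetD cakes s.2 (0, 0)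
        let collinear := (PySem.List.pyRange 0 (PySem.List.len cakes) 1).foldl
          (fun acc i =>
            if ¬(i = s.1 ∨ i = s.2) then
              if pvOrient p q (PySem.List.pyGetD cakes i (0, 0)) = 0 then acc ++ [i] else acc
            else acc) []
        if collinear ≠ [] then segments ++ [(s, pvLen2 p q, collinear)] else segments) init
      = init ++ (l.filter (fun s => pvColl cakes s.1 s.2 ≠ [])).map (pvSegOf cakes) by
    have h2 := h (pvComb2 (PySem.List.len cakes)) []
    rw [List.nil_append] at h2
    exact h2
  intro l
  induction l with
  | nil => simp
  | cons x xs ih =>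
    intro init
    rw [List.foldl_cons, List.filter_cons]
    have hx : ((PySem.List.pyRange 0 (PySem.List.len cakes) 1).foldl
        (fun acc i =>
          if ¬(i = x.1 ∨ i = x.2) then
            if pvOrient (PySem.List.pyGetD cakes x.1 (0, 0)) (PySem.List.pyGetD cakes x.2 (0, 0))
                (PySem.List.pyGetD cakes i (0, 0)) = 0 then acc ++ [i] else acc
          else acc) []) = pvColl cakes x.1 x.2 := by
      rw [hin x]
      simp [pvColl]
    show xs.foldl _ (if _ ≠ ([] : List Int) then _ else _) = _
    rw [hx, ih]
    by_cases hc : pvColl cakes x.1 x.2 ≠ []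
    · rw [if_pos hc, if_pos (by simpa using hc)]
      simp only [List.map_cons, pvSegOf, pvV]
      simp
    · rw [if_neg hc, if_neg (by simpa using hc)]

theorem alt_eq (cakes : List (Int × Int)) :
    checkio_alt cakes = ((PySem.Set.ofList (pvCand cakes)).length : Int) := by
  have hadd : ∀ (l : List (Int × Int)) (s0 : PySem.Set (List Int)),
      l.foldl (fun rows s =>
        if PySem.List.pyGetD cakes s.1 (0, 0) ≠ PySem.List.pyGetD cakes s.2 (0, 0) then
          let pts := (PySem.List.pyRange 0 (PySem.List.len cakes) 1).filter
            (fun k => pvOrient (PySem.List.pyGetD cakes s.1 (0, 0))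
              (PySem.List.pyGetD cakes s.2 (0, 0)) (PySem.List.pyGetD cakes k (0, 0)) = 0)
          if 3 ≤ PySem.List.len pts then PySem.Set.add rows pts else rows
        else rows) s0
      = ((l.filter (fun s => pvV cakes s.1 ≠ pvV cakes s.2 ∧
            3 ≤ PySem.List.len (pvPts cakes s.1 s.2))).map
          (fun s => pvPts cakes s.1 s.2)).foldl PySem.Set.add s0 := by
    intro l
    induction l with
    | nil => simp
    | cons x xs ih =>
      intro s0
      rw [List.foldl_cons, List.filter_cons]
      by_cases h1 : pvV cakes x.1 ≠ pvV cakes x.2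
      · by_cases h2 : 3 ≤ PySem.List.len (pvPts cakes x.1 x.2)
        · rw [if_pos (by simpa [pvV] using h1), ih,
            show (decide (pvV cakes x.1 ≠ pvV cakes x.2 ∧
              3 ≤ PySem.List.len (pvPts cakes x.1 x.2))) = true from decide_eq_true ⟨h1, h2⟩,
            if_pos rfl, List.map_cons, List.foldl_cons]
          congr 1
          show (if 3 ≤ PySem.List.len (pvPts cakes x.1 x.2) then
            PySem.Set.add s0 (pvPts cakes x.1 x.2) else s0) = PySem.Set.add s0 (pvPts cakes x.1 x.2)
          rw [if_pos h2]
        · rw [if_pos (by simpa [pvV] using h1), ih,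
            show (decide (pvV cakes x.1 ≠ pvV cakes x.2 ∧
              3 ≤ PySem.List.len (pvPts cakes x.1 x.2))) = false from
              decide_eq_false fun hx => h2 hx.2,
            if_neg Bool.false_ne_true]
          congr 1
          show (if 3 ≤ PySem.List.len (pvPts cakes x.1 x.2) then
            PySem.Set.add s0 (pvPts cakes x.1 x.2) else s0) = s0
          rw [if_neg h2]
      · rw [if_neg (by simpa [pvV] using h1), ih,
          show (decide (pvV cakes x.1 ≠ pvV cakes x.2 ∧
            3 ≤ PySem.List.len (pvPts cakes x.1 x.2))) = false from
            decide_eq_false fun hx => h1 hx.1,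
          if_neg Bool.false_ne_true]
  have hG : checkio_alt cakes = PySem.Set.len
      ((pvComb2 (PySem.List.len cakes)).foldl (fun rows s =>
        if PySem.List.pyGetD cakes s.1 (0, 0) ≠ PySem.List.pyGetD cakes s.2 (0, 0) then
          let pts := (PySem.List.pyRange 0 (PySem.List.len cakes) 1).filter
            (fun k => pvOrient (PySem.List.pyGetD cakes s.1 (0, 0))
              (PySem.List.pyGetD cakes s.2 (0, 0)) (PySem.List.pyGetD cakes k (0, 0)) = 0)
          if 3 ≤ PySem.List.len pts then PySem.Set.add rows pts else rows
        else rows) PySem.Set.empty) := by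
    show checkio_alt cakes = PySem.Set.len ((pvComb2 (PySem.List.len cakes)).foldl _ _)
    rw [pvComb2, List.foldl_flatMap]
    simp only [List.foldl_map]
    rfl
  rw [hG, hadd]
  rw [show (PySem.Set.empty : PySem.Set (List Int)) = [] from rfl, ← PySem.Set.ofList_eq_foldl]
  simp [PySem.Set.len, pvCand]

-- ---- facts about pvPts / pvColl ----
theorem mem_pts (cakes : List (Int × Int)) (i j a : Int) :
    a ∈ pvPts cakes i j ↔
      0 ≤ a ∧ a < (cakes.length : Int) ∧ pvOrient (pvV cakes i) (pvV cakes j) (pvV cakes a) = 0 := by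
  simp [pvPts, List.mem_filter, PySem.List.mem_pyRange_one, and_assoc]

theorem mem_coll (cakes : List (Int × Int)) (i j a : Int) :
    a ∈ pvColl cakes i j ↔
      0 ≤ a ∧ a < (cakes.length : Int) ∧ ¬(a = i ∨ a = j) ∧
        pvOrient (pvV cakes i) (pvV cakes j) (pvV cakes a) = 0 := by
  simp [pvColl, List.mem_filter, PySem.List.mem_pyRange_one, and_assoc]

theorem nodup_coll (cakes : List (Int × Int)) (i j : Int) : (pvColl cakes i j).Nodup := by
  exact (PySem.List.nodup_pyRange_one 0 (PySem.List.len cakes)).filter _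

theorem pts_perm (cakes : List (Int × Int)) (i j : Int) (h0 : 0 ≤ i) (hij : i < j)
    (hj : j < (cakes.length : Int)) :
    (pvPts cakes i j).Perm (i :: j :: pvColl cakes i j) := by
  have hnd : (pvPts cakes i j).Nodup :=
    (PySem.List.nodup_pyRange_one 0 (PySem.List.len cakes)).filter _
  have hnd2 : (i :: j :: pvColl cakes i j).Nodup := by
    simp only [List.nodup_cons]
    refine ⟨?_, ?_, nodup_coll cakes i j⟩
    · simp only [List.mem_cons, mem_coll]
      rintro (h | ⟨_, _, h, _⟩)
      · omega
      · exact h (by tauto)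
    · simp only [mem_coll]
      rintro ⟨_, _, h, _⟩; exact h (by tauto)
  refine (List.perm_ext_iff_of_nodup hnd hnd2).mpr fun a => ?_
  simp only [mem_pts, List.mem_cons, mem_coll]
  constructor
  · rintro ⟨h0, hn, ho⟩
    by_cases hai : a = i
    · exact Or.inl hai
    by_cases haj : a = j
    · exact Or.inr (Or.inl haj)
    · exact Or.inr (Or.inr ⟨h0, hn, by tauto, ho⟩)
  · rintro (rfl | rfl | ⟨h0, hn, _, ho⟩)
    · exact ⟨h0, by omega, orient_self_left _ _⟩
    · exact ⟨by omega, hj, orient_self_right _ _⟩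
    · exact ⟨h0, hn, ho⟩

theorem pts_len (cakes : List (Int × Int)) (i j : Int) (h0 : 0 ≤ i) (hij : i < j)
    (hj : j < (cakes.length : Int)) :
    (pvPts cakes i j).length = (pvColl cakes i j).length + 2 := by
  have h := (pts_perm cakes i j h0 hij hj).length_eq
  simp only [List.length_cons] at h
  omega

theorem coll_ne_iff (cakes : List (Int × Int)) (i j : Int) (h0 : 0 ≤ i) (hij : i < j)
    (hj : j < (cakes.length : Int)) :
    pvColl cakes i j ≠ [] ↔ 3 ≤ PySem.List.len (pvPts cakes i j) := by
  rw [← List.length_pos_iff_ne_nil]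
  simp only [PySem.List.len_eq, pts_len cakes i j h0 hij hj]
  constructor <;> intro h
  · push_cast; omega
  · by_contra hc; push_cast at h; omega

theorem pts_eq_of_mem (cakes : List (Int × Int)) (a b i j : Int)
    (hab : pvV cakes a ≠ pvV cakes b) (hij : pvV cakes i ≠ pvV cakes j)
    (hi : pvOrient (pvV cakes a) (pvV cakes b) (pvV cakes i) = 0)
    (hj : pvOrient (pvV cakes a) (pvV cakes b) (pvV cakes j) = 0) :
    pvPts cakes i j = pvPts cakes a b := by
  simp only [pvPts]
  refine List.filter_congr fun k _ => ?_
  exact decide_eq_decide.mpr (orient_trans _ _ _ _ _ hij hab hi hj)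

-- ---- ids bookkeeping ----
theorem foldl_idadd (cnt : Int) (rs : List Int) :
    ∀ (acc : List (PySem.Set Int)), rs.Nodup → (∀ r ∈ rs, 0 ≤ r ∧ r < (acc.length : Int)) →
      (rs.foldl (fun acc r => PySem.List.pySetD acc r
          (PySem.Set.add (PySem.List.pyGetD acc r PySem.Set.empty) cnt)) acc).length = acc.length ∧
      ∀ a : Int, 0 ≤ a → a < (acc.length : Int) →
        PySem.List.pyGetD (rs.foldl (fun acc r => PySem.List.pySetD acc r
            (PySem.Set.add (PySem.List.pyGetD acc r PySem.Set.empty) cnt)) acc) a PySem.Set.empty =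
          if a ∈ rs then PySem.Set.add (PySem.List.pyGetD acc a PySem.Set.empty) cnt
          else PySem.List.pyGetD acc a PySem.Set.empty := by
  induction rs with
  | nil => simp
  | cons r rs ih =>
    intro acc hnd hb
    have hr := hb r (by simp)
    have hlen1 : (PySem.List.pySetD acc r
        (PySem.Set.add (PySem.List.pyGetD acc r PySem.Set.empty) cnt)).length = acc.length := by
      rw [PySem.List.pySetD_of_nonneg _ _ hr.1, List.length_set]
    have hget1 : ∀ (a : Int), 0 ≤ a → a < (acc.length : Int) →
        PySem.List.pyGetD (PySem.List.pySetD acc r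
            (PySem.Set.add (PySem.List.pyGetD acc r PySem.Set.empty) cnt)) a PySem.Set.empty =
          if a = r then PySem.Set.add (PySem.List.pyGetD acc a PySem.Set.empty) cnt
          else PySem.List.pyGetD acc a PySem.Set.empty := by
      intro a ha0 han
      rw [PySem.List.pySetD_of_nonneg _ _ hr.1]
      rw [PySem.List.pyGetD_eq_getElem _ _ ha0 (by simpa [List.length_set] using han)]
      rw [List.getElem_set]
      by_cases hcase : a = r
      · rw [if_pos (by omega), if_pos hcase, hcase,
          PySem.List.pyGetD_eq_getElem _ _ hr.1 hr.2]
      · rw [if_neg (by omega), if_neg hcase,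
          PySem.List.pyGetD_eq_getElem _ _ ha0 han]
    simp only [List.nodup_cons] at hnd
    obtain ⟨hlen2, hget2⟩ := ih (PySem.List.pySetD acc r
        (PySem.Set.add (PySem.List.pyGetD acc r PySem.Set.empty) cnt)) hnd.2
      (fun x hx => by rw [hlen1]; exact hb x (by simp [hx]))
    refine ⟨by rw [List.foldl_cons, hlen2, hlen1], ?_⟩
    intro a ha0 han
    rw [List.foldl_cons, hget2 a ha0 (by rw [hlen1]; exact han)]
    by_cases hmem : a ∈ rs
    · have har : a ≠ r := fun h => hnd.1 (h ▸ hmem)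
      rw [if_pos hmem, if_pos (by simp [hmem]), hget1 a ha0 han, if_neg har]
    · rw [if_neg hmem, hget1 a ha0 han]
      by_cases har : a = r
      · rw [if_pos har, if_pos (by simp [har])]
      · rw [if_neg har, if_neg (by simp [hmem, har])]

-- ---- evaluating one step of A's greedy loop ----
theorem pvStep_eval (st : Int × List (PySem.Set Int)) (s : (Int × Int) × Int × List Int) :
    pvStep st s =
      if PySem.List.pyGetD st.2 s.1.1 PySem.Set.empty ≠ PySem.Set.empty ∧
          PySem.List.pyGetD st.2 s.1.2 PySem.Set.empty ≠ PySem.Set.empty ∧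
          PySem.Set.inter (PySem.List.pyGetD st.2 s.1.1 PySem.Set.empty)
            (PySem.List.pyGetD st.2 s.1.2 PySem.Set.empty) ≠ PySem.Set.empty
      then st
      else (st.1 + 1,
        (s.1.1 :: s.1.2 :: s.2.2).foldl
          (fun acc r => PySem.List.pySetD acc r
            (PySem.Set.add (PySem.List.pyGetD acc r PySem.Set.empty) st.1)) st.2) := rfl

-- ---- the greedy loop of A counts exactly the distinct rows ----
theorem pvGreedy (cakes : List (Int × Int))
    (hOdd : (3:Int) ≤ (cakes.length : Int) → ∀ i : Int, 0 ≤ i → i < (cakes.length : Int) →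
      ∃ w : Int, 0 ≤ w ∧ w < (cakes.length : Int) ∧ pvV cakes w ≠ pvV cakes i) :
    ∀ (L : List ((Int × Int) × Int × List Int)) (C : List (List Int)) (ids : List (PySem.Set Int)),
    (∀ e ∈ L, ∃ i j : Int, 0 ≤ i ∧ i < j ∧ j < (cakes.length : Int) ∧
        e = pvSegOf cakes (i, j) ∧ pvColl cakes i j ≠ []) →
    L.Pairwise (fun a b => b.2.1 ≤ a.2.1) →
    C.Nodup →
    (∀ X ∈ C, ∃ i j, pvValid cakes i j ∧ X = pvPts cakes i j) →
    (∀ i j, pvValid cakes i j → pvSegOf cakes (i, j) ∉ L → pvPts cakes i j ∈ C) →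
    ids.length = cakes.length →
    (∀ (a c : Int), 0 ≤ a → a < (cakes.length : Int) →
      (c ∈ PySem.List.pyGetD ids a PySem.Set.empty ↔
        ∃ k : ℕ, k < C.length ∧ c = (k : Int) ∧ a ∈ C.getD k [])) →
    ∃ C2 : List (List Int),
      (L.foldl pvStep ((C.length : Int), ids)).1 = (C2.length : Int) ∧ C2.Nodup ∧
      (∀ X, X ∈ C2 ↔ ∃ i j, pvValid cakes i j ∧ X = pvPts cakes i j) := by
  intro L
  induction L with
  | nil =>
    intro C ids _ _ hCn hCsub hdone _ _
    refine ⟨C, rfl, hCn, fun X => ⟨fun hX => hCsub X hX, ?_⟩⟩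
    rintro ⟨i, j, hv, rfl⟩
    exact hdone i j hv (List.not_mem_nil)
  | cons e L ih =>
    intro C ids hL hsort hCn hCsub hdone hlen hids
    obtain ⟨i, j, hi0, hij, hjn, he, hcoll⟩ := hL e (by simp)
    subst he
    have hj0 : (0:Int) ≤ j := by omega
    have hin : i < (cakes.length : Int) := by omega
    -- getting an index for a member of C
    have hgetC : ∀ X ∈ C, ∃ k : ℕ, k < C.length ∧ C.getD k [] = X := by
      intro X hX
      obtain ⟨k, hk, hke⟩ := List.mem_iff_getElem.mp hX
      exact ⟨k, hk, by rw [List.getD_eq_getElem _ _ hk, hke]⟩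
    -- the skip condition of the step, in terms of C
    have hfwd : (∃ X ∈ C, i ∈ X ∧ j ∈ X) →
        (PySem.List.pyGetD ids i PySem.Set.empty ≠ PySem.Set.empty ∧
          PySem.List.pyGetD ids j PySem.Set.empty ≠ PySem.Set.empty ∧
          PySem.Set.inter (PySem.List.pyGetD ids i PySem.Set.empty)
            (PySem.List.pyGetD ids j PySem.Set.empty) ≠ PySem.Set.empty) := by
      rintro ⟨X, hX, hiX, hjX⟩
      obtain ⟨k, hk, hkX⟩ := hgetC X hX
      have hip : ((k : Int)) ∈ PySem.List.pyGetD ids i PySem.Set.empty :=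
        (hids i _ hi0 hin).mpr ⟨k, hk, rfl, by rw [hkX]; exact hiX⟩
      have hjp : ((k : Int)) ∈ PySem.List.pyGetD ids j PySem.Set.empty :=
        (hids j _ hj0 hjn).mpr ⟨k, hk, rfl, by rw [hkX]; exact hjX⟩
      exact ⟨List.ne_nil_of_mem hip, List.ne_nil_of_mem hjp,
        List.ne_nil_of_mem ((PySem.Set.mem_inter _ _ _).mpr ⟨hip, hjp⟩)⟩
    have hbwd : (PySem.List.pyGetD ids i PySem.Set.empty ≠ PySem.Set.empty ∧
          PySem.List.pyGetD ids j PySem.Set.empty ≠ PySem.Set.empty ∧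
          PySem.Set.inter (PySem.List.pyGetD ids i PySem.Set.empty)
            (PySem.List.pyGetD ids j PySem.Set.empty) ≠ PySem.Set.empty) →
        ∃ X ∈ C, i ∈ X ∧ j ∈ X := by
      rintro ⟨-, -, hint⟩
      obtain ⟨c, hcmem⟩ := List.exists_mem_of_ne_nil _ hint
      obtain ⟨hci, hcj⟩ := (PySem.Set.mem_inter _ _ _).mp hcmem
      obtain ⟨k1, hk1, hck1, hik1⟩ := (hids i c hi0 hin).mp hci
      obtain ⟨k2, hk2, hck2, hjk2⟩ := (hids j c hj0 hjn).mp hcj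
      have hkk : k1 = k2 := by omega
      refine ⟨C.getD k1 [], ?_, hik1, ?_⟩
      · rw [List.getD_eq_getElem _ _ hk1]; exact List.getElem_mem hk1
      · rw [hkk]; exact hjk2
    rw [List.foldl_cons, pvStep_eval]
    simp only [pvSegOf]
    by_cases hVij : pvV cakes i = pvV cakes j
    · -- degenerate pair: it is always skipped (outside D_)
      have hn3 : (3:Int) ≤ (cakes.length : Int) := by
        obtain ⟨m, hm⟩ := List.exists_mem_of_ne_nil _ hcoll
        rw [mem_coll] at hm
        omega
      obtain ⟨w, hw0, hwn, hwne⟩ := hOdd hn3 i hi0 hin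
      have hiw : i ≠ w := fun h => hwne (h ▸ rfl)
      -- the (sorted-first) nondegenerate pair through the duplicated point
      obtain ⟨a, b, ha0, hab, hbn, hcase⟩ :
          ∃ a b : Int, 0 ≤ a ∧ a < b ∧ b < (cakes.length : Int) ∧
            ((a = i ∧ b = w) ∨ (a = w ∧ b = i)) := by
        rcases lt_or_gt_of_ne hiw with h | h
        · exact ⟨i, w, hi0, h, hwn, Or.inl ⟨rfl, rfl⟩⟩
        · exact ⟨w, i, hw0, h, hin, Or.inr ⟨rfl, rfl⟩⟩
      have hVab : pvV cakes a ≠ pvV cakes b := by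
        rcases hcase with ⟨rfl, rfl⟩ | ⟨rfl, rfl⟩
        · exact fun hh => hwne hh.symm
        · exact hwne
      have horienti : pvOrient (pvV cakes a) (pvV cakes b) (pvV cakes i) = 0 := by
        rcases hcase with ⟨rfl, rfl⟩ | ⟨rfl, rfl⟩
        · exact orient_self_left _ _
        · exact orient_self_right _ _
      have horientj : pvOrient (pvV cakes a) (pvV cakes b) (pvV cakes j) = 0 := by
        rw [← hVij]; exact horienti
      have hjw : j ≠ w := fun h => hwne (by rw [← h, ← hVij])
      have hjcoll : j ∈ pvColl cakes a b := by
        rw [mem_coll]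
        refine ⟨hj0, hjn, ?_, horientj⟩
        rcases hcase with ⟨rfl, rfl⟩ | ⟨rfl, rfl⟩
        · rintro (h | h)
          · omega
          · exact hjw h
        · rintro (h | h)
          · exact hjw h
          · omega
      have hvab : pvValid cakes a b :=
        ⟨ha0, hab, hbn, hVab, List.ne_nil_of_mem hjcoll⟩
      have hnotL : pvSegOf cakes (a, b) ∉ pvSegOf cakes (i, j) :: L := by
        intro hmem
        rcases List.mem_cons.mp hmem with hh | hh
        · have : (a, b) = (i, j) := congrArg (fun t => t.1) hh
          have ha : a = i := congrArg Prod.fst this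
          have hb : b = j := congrArg Prod.snd this
          exact hVab (by rw [ha, hb, hVij])
        · have hle := (List.pairwise_cons.mp hsort).1 _ hh
          simp only [pvSegOf] at hle
          rw [hVij, len2_zero] at hle
          exact absurd hle (not_le.mpr (len2_pos _ _ hVab))
      have hX : pvPts cakes a b ∈ C := hdone a b hvab hnotL
      have himem : i ∈ pvPts cakes a b := (mem_pts _ _ _ _).mpr ⟨hi0, hin, horienti⟩
      have hjmem : j ∈ pvPts cakes a b := (mem_pts _ _ _ _).mpr ⟨hj0, hjn, horientj⟩
      rw [if_pos (hfwd ⟨_, hX, himem, hjmem⟩)]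
      refine ih C ids (fun e he => hL e (by simp [he])) (List.pairwise_cons.mp hsort).2
        hCn hCsub ?_ hlen hids
      intro p q hv hpq
      by_cases hsame : pvSegOf cakes (p, q) = pvSegOf cakes (i, j)
      · have : (p, q) = (i, j) := congrArg (fun t => t.1) hsame
        have hp : p = i := congrArg Prod.fst this
        have hq : q = j := congrArg Prod.snd this
        exact absurd (hp ▸ hq ▸ hv.2.2.2.1) (not_not.mpr hVij)
      · exact hdone p q hv (by simp [hsame, hpq])
    · -- nondegenerate pair
      have himem : i ∈ pvPts cakes i j := (mem_pts _ _ _ _).mpr ⟨hi0, hin, orient_self_left _ _⟩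
      have hjmem : j ∈ pvPts cakes i j := (mem_pts _ _ _ _).mpr ⟨hj0, hjn, orient_self_right _ _⟩
      by_cases hc : (PySem.List.pyGetD ids i PySem.Set.empty ≠ PySem.Set.empty ∧
          PySem.List.pyGetD ids j PySem.Set.empty ≠ PySem.Set.empty ∧
          PySem.Set.inter (PySem.List.pyGetD ids i PySem.Set.empty)
            (PySem.List.pyGetD ids j PySem.Set.empty) ≠ PySem.Set.empty)
      · -- skipped: this row is already counted
        obtain ⟨X, hXC, hiX, hjX⟩ := hbwd hc
        obtain ⟨a, b, hvab, rfl⟩ := hCsub X hXC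
        have hiX' := (mem_pts _ _ _ _).mp hiX
        have hjX' := (mem_pts _ _ _ _).mp hjX
        have hptsC : pvPts cakes i j ∈ C := by
          rw [pts_eq_of_mem cakes a b i j hvab.2.2.2.1 hVij hiX'.2.2 hjX'.2.2]
          exact hXC
        rw [if_pos hc]
        refine ih C ids (fun e he => hL e (by simp [he])) (List.pairwise_cons.mp hsort).2
          hCn hCsub ?_ hlen hids
        intro p q hv hpq
        by_cases hsame : pvSegOf cakes (p, q) = pvSegOf cakes (i, j)
        · have : (p, q) = (i, j) := congrArg (fun t => t.1) hsame
          have hp : p = i := congrArg Prod.fst this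
          have hq : q = j := congrArg Prod.snd this
          rw [hp, hq]; exact hptsC
        · exact hdone p q hv (by simp [hsame, hpq])
      · -- counted: a new row
        rw [if_neg hc]
        have hptsnotC : pvPts cakes i j ∉ C := fun hmem =>
          hc (hfwd ⟨_, hmem, himem, hjmem⟩)
        have hrs_nodup : (i :: j :: pvColl cakes i j).Nodup := by
          simp only [List.nodup_cons]
          refine ⟨?_, ?_, nodup_coll cakes i j⟩
          · simp only [List.mem_cons, mem_coll]
            rintro (h | ⟨-, -, h, -⟩)
            · omega
            · exact h (by tauto)
          · simp only [mem_coll]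
            rintro ⟨-, -, h, -⟩
            exact h (by tauto)
        have hrs_bd : ∀ r ∈ i :: j :: pvColl cakes i j, 0 ≤ r ∧ r < (ids.length : Int) := by
          intro r hr
          rw [hlen]
          rcases List.mem_cons.mp hr with rfl | hr
          · exact ⟨hi0, hin⟩
          rcases List.mem_cons.mp hr with rfl | hr
          · exact ⟨hj0, hjn⟩
          · have := (mem_coll _ _ _ _).mp hr
            exact ⟨this.1, this.2.1⟩
        obtain ⟨hlen3, hget3⟩ := foldl_idadd ((C.length : Int)) (i :: j :: pvColl cakes i j)
          ids hrs_nodup hrs_bd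
        have hmemiff : ∀ a : Int, (a ∈ i :: j :: pvColl cakes i j ↔ a ∈ pvPts cakes i j) :=
          fun a => ((pts_perm cakes i j hi0 hij hjn).mem_iff).symm
        refine ?_
        have hC'len : ((C ++ [pvPts cakes i j]).length : Int) = (C.length : Int) + 1 := by
          simp
        rw [show ((C.length : Int) + 1) = ((C ++ [pvPts cakes i j]).length : Int) from hC'len.symm]
        refine ih (C ++ [pvPts cakes i j]) _ (fun e he => hL e (by simp [he]))
          (List.pairwise_cons.mp hsort).2 ?_ ?_ ?_ (by rw [hlen3, hlen]) ?_
        · exact List.Nodup.append hCn (List.nodup_singleton _)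
            (fun a ha hb => hptsnotC ((List.mem_singleton.mp hb) ▸ ha))
        · intro X hX
          rcases List.mem_append.mp hX with hX | hX
          · exact hCsub X hX
          · exact ⟨i, j, ⟨hi0, hij, hjn, hVij, hcoll⟩, by simpa using hX⟩
        · intro p q hv hpq
          by_cases hsame : pvSegOf cakes (p, q) = pvSegOf cakes (i, j)
          · have : (p, q) = (i, j) := congrArg (fun t => t.1) hsame
            have hp : p = i := congrArg Prod.fst this
            have hq : q = j := congrArg Prod.snd this
            rw [hp, hq]; simp
          · exact List.mem_append_left _ (hdone p q hv (by simp [hsame, hpq]))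
        · intro a c ha0 han
          rw [hget3 a ha0 (by rw [hlen]; exact han)]
          constructor
          · intro hcm
            by_cases ham : a ∈ i :: j :: pvColl cakes i j
            · rw [if_pos ham] at hcm
              rcases (PySem.Set.mem_add _ _ _).mp hcm with hcm | hcm
              · obtain ⟨k, hk, hck, hak⟩ := (hids a c ha0 han).mp hcm
                refine ⟨k, by simp; omega, hck, ?_⟩
                rw [List.getD_append C [pvPts cakes i j] [] k hk]
                exact hak
              · refine ⟨C.length, by simp, hcm, ?_⟩
                rw [List.getD_append_right C [pvPts cakes i j] [] C.length (le_refl _)]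
                simpa using (hmemiff a).mp ham
            · rw [if_neg ham] at hcm
              obtain ⟨k, hk, hck, hak⟩ := (hids a c ha0 han).mp hcm
              exact ⟨k, by simp; omega, hck,
                by rw [List.getD_append C [pvPts cakes i j] [] k hk]; exact hak⟩
          · rintro ⟨k, hk, hck, hak⟩
            simp only [List.length_append, List.length_cons, List.length_nil] at hk
            by_cases hklt : k < C.length
            · have hold : c ∈ PySem.List.pyGetD ids a PySem.Set.empty :=
                (hids a c ha0 han).mpr ⟨k, hklt, hck,
                  by rw [List.getD_append C [pvPts cakes i j] [] k hklt] at hak; exact hak⟩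
              by_cases ham : a ∈ i :: j :: pvColl cakes i j
              · rw [if_pos ham]
                exact (PySem.Set.mem_add _ _ _).mpr (Or.inl hold)
              · rw [if_neg ham]
                exact hold
            · have hkeq : k = C.length := by omega
              subst hkeq
              rw [List.getD_append_right C [pvPts cakes i j] [] C.length (le_refl _)] at hak
              simp only [Nat.sub_self, List.getD_cons_zero] at hak
              have ham : a ∈ i :: j :: pvColl cakes i j := (hmemiff a).mpr hak
              rw [if_pos ham]
              exact (PySem.Set.mem_add _ _ _).mpr (Or.inr hck)


-- ===== VERDICT (by name: the statement is the Claim_ definition above) =====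
-- ---- candidate rows: A's valid pairs and B's kept pairs coincide ----
theorem mem_ofList_cand (cakes : List (Int × Int)) (X : List Int) :
    X ∈ PySem.Set.ofList (pvCand cakes) ↔ ∃ i j, pvValid cakes i j ∧ X = pvPts cakes i j := by
  rw [PySem.Set.mem_ofList]
  simp only [pvCand, List.mem_map, List.mem_filter, decide_eq_true_eq]
  constructor
  · rintro ⟨s, ⟨hs, hvne, hlen⟩, rfl⟩
    obtain ⟨h0, hlt, hn⟩ := (mem_comb2 _ s).mp hs
    exact ⟨s.1, s.2, ⟨h0, hlt, hn, hvne, (coll_ne_iff cakes s.1 s.2 h0 hlt hn).mpr hlen⟩, rfl⟩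
  · rintro ⟨i, j, ⟨h0, hlt, hn, hvne, hcoll⟩, rfl⟩
    exact ⟨(i, j), ⟨(mem_comb2 _ (i, j)).mpr ⟨h0, hlt, hn⟩, hvne,
      (coll_ne_iff cakes i j h0 hlt hn).mp hcoll⟩, rfl⟩

-- ---- inside D_ (all cakes at one point): A returns 1, B returns 0 ----
theorem orient_degenerate (p r : Int × Int) : pvOrient p p r = 0 := by
  simp only [pvOrient]; ring

theorem vconst (cakes : List (Int × Int)) (hall : ∀ p ∈ cakes, p = cakes.getD 0 (0, 0))
    (k : Int) (h0 : 0 ≤ k) (hn : k < (cakes.length : Int)) :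
    pvV cakes k = cakes.getD 0 (0, 0) := by
  rw [pvV, PySem.List.pyGetD_eq_getElem _ _ h0 hn]
  exact hall _ (cakes.getElem_mem _)

theorem deg_B (cakes : List (Int × Int)) (hall : ∀ p ∈ cakes, p = cakes.getD 0 (0, 0)) :
    checkio_alt cakes = 0 := by
  rw [alt_eq]
  have hc : pvCand cakes = [] := by
    unfold pvCand
    rw [List.filter_eq_nil_iff.mpr, List.map_nil]
    intro s hs
    obtain ⟨h0, hlt, hn⟩ := (mem_comb2 _ s).mp hs
    rw [PySem.List.len_eq] at hn
    simp only [decide_eq_true_eq, not_and]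
    intro hne
    exact False.elim (hne (show pvV cakes s.1 = pvV cakes s.2 by
      rw [vconst cakes hall s.1 h0 (by omega), vconst cakes hall s.2 (by omega) hn]))
  rw [hc]
  rfl

theorem all_skip : ∀ (L : List ((Int × Int) × Int × List Int)) (st : Int × List (PySem.Set Int)),
    (∀ e ∈ L, PySem.List.pyGetD st.2 e.1.1 PySem.Set.empty ≠ PySem.Set.empty ∧
        PySem.List.pyGetD st.2 e.1.2 PySem.Set.empty ≠ PySem.Set.empty ∧
        PySem.Set.inter (PySem.List.pyGetD st.2 e.1.1 PySem.Set.empty)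
          (PySem.List.pyGetD st.2 e.1.2 PySem.Set.empty) ≠ PySem.Set.empty) →
    L.foldl pvStep st = st := by
  intro L
  induction L with
  | nil => intro st _; rfl
  | cons e L ih =>
    intro st h
    rw [List.foldl_cons, pvStep_eval, if_pos (h e (by simp))]
    exact ih st fun e' he' => h e' (by simp [he'])

set_option maxHeartbeats 1000000 in
theorem deg_A (cakes : List (Int × Int)) (h3 : 3 ≤ cakes.length)
    (hall : ∀ p ∈ cakes, p = cakes.getD 0 (0, 0)) : checkio cakes = 1 := by
  have hn3 : (3 : Int) ≤ (cakes.length : Int) := by exact_mod_cast h3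
  -- every segment has zero squared length, so the sort keeps the list as it is
  have hkey : ∀ e ∈ pvSegments cakes, e.2.1 = 0 := by
    intro e he
    rw [segments_eq] at he
    obtain ⟨s, hs, rfl⟩ := List.mem_map.mp he
    obtain ⟨h0, hlt, hn⟩ := (mem_comb2 _ s).mp (List.mem_filter.mp hs).1
    rw [PySem.List.len_eq] at hn
    show pvLen2 (pvV cakes s.1) (pvV cakes s.2) = 0
    rw [vconst cakes hall s.1 h0 (by omega), vconst cakes hall s.2 (by omega) hn, len2_zero]
  have hsorted : PySem.List.sorted (pvSegments cakes) (fun x => x.2.1) true = pvSegments cakes :=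
    PySem.List.sorted_rev_eq_self_of_pairwise _ _
      (List.pairwise_of_forall_mem_list fun a ha b hb => by rw [hkey a ha, hkey b hb])
  -- the segment list is not empty: the pair (0, 1) has collinear companions
  have h01 : pvSegOf cakes (0, 1) ∈ pvSegments cakes := by
    rw [segments_eq]
    refine List.mem_map.mpr ⟨(0, 1), List.mem_filter.mpr ⟨(mem_comb2 _ (0, 1)).mpr
      (by simp [PySem.List.len_eq]; omega), decide_eq_true ?_⟩, rfl⟩
    refine List.ne_nil_of_mem (a := 2) ((mem_coll _ _ _ _).mpr ⟨by omega, by omega, by omega, ?_⟩)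
    rw [vconst cakes hall 0 (by omega) (by omega), vconst cakes hall 1 (by omega) (by omega),
      orient_degenerate]
  show (List.foldl pvStep (0, List.replicate (PySem.List.len cakes).toNat PySem.Set.empty)
      (PySem.List.sorted (pvSegments cakes) (fun x => x.2.1) true)).1 = 1
  rw [hsorted]
  obtain ⟨x, xs, hxeq⟩ : ∃ x xs, pvSegments cakes = x :: xs := by
    cases hseg : pvSegments cakes with
    | nil => rw [hseg] at h01; exact absurd h01 (List.not_mem_nil)
    | cons x xs => exact ⟨x, xs, rfl⟩
  rw [hxeq]
  obtain ⟨i, j, hi0, hij, hjn, hx, hcoll⟩ : ∃ i j : Int, 0 ≤ i ∧ i < j ∧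
      j < (cakes.length : Int) ∧ x = pvSegOf cakes (i, j) ∧ pvColl cakes i j ≠ [] := by
    have hx : x ∈ pvSegments cakes := by rw [hxeq]; simp
    rw [segments_eq] at hx
    obtain ⟨s, hs, rfl⟩ := List.mem_map.mp hx
    obtain ⟨h0, hlt, hn⟩ := (mem_comb2 _ s).mp (List.mem_filter.mp hs).1
    rw [PySem.List.len_eq] at hn
    exact ⟨s.1, s.2, h0, hlt, hn, rfl, of_decide_eq_true (List.mem_filter.mp hs).2⟩
  subst hx
  have hreplen : (List.replicate (PySem.List.len cakes).toNat
      (PySem.Set.empty : PySem.Set Int)).length = cakes.length := by simp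
  have hrepget : ∀ a : Int, 0 ≤ a → a < (cakes.length : Int) →
      PySem.List.pyGetD (List.replicate (PySem.List.len cakes).toNat
        (PySem.Set.empty : PySem.Set Int)) a PySem.Set.empty = PySem.Set.empty := by
    intro a h0 hn
    rw [PySem.List.pyGetD_eq_getElem _ _ h0 (by rw [hreplen]; exact hn)]
    simp
  rw [List.foldl_cons, pvStep_eval,
    if_neg (by
      rintro ⟨hne, -, -⟩
      exact hne (by
        show PySem.List.pyGetD _ ((pvSegOf cakes (i, j)).1.1) _ = _
        simp only [pvSegOf]
        exact hrepget i hi0 (by omega)))]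
  simp only [pvSegOf]
  -- after the first counted segment every point carries id 0
  have hrs_nodup : (i :: j :: pvColl cakes i j).Nodup := by
    simp only [List.nodup_cons]
    refine ⟨?_, ?_, nodup_coll cakes i j⟩
    · simp only [List.mem_cons, mem_coll]
      rintro (h | ⟨-, -, h, -⟩)
      · omega
      · exact h (by tauto)
    · simp only [mem_coll]
      rintro ⟨-, -, h, -⟩
      exact h (by tauto)
  have hrs_bd : ∀ r ∈ i :: j :: pvColl cakes i j,
      0 ≤ r ∧ r < ((List.replicate (PySem.List.len cakes).toNat
        (PySem.Set.empty : PySem.Set Int)).length : Int) := by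
    intro r hr
    rw [hreplen]
    rcases List.mem_cons.mp hr with rfl | hr
    · exact ⟨hi0, by omega⟩
    rcases List.mem_cons.mp hr with rfl | hr
    · exact ⟨by omega, hjn⟩
    · have := (mem_coll _ _ _ _).mp hr
      exact ⟨this.1, this.2.1⟩
  obtain ⟨hlen3, hget3⟩ := foldl_idadd (0 : Int) (i :: j :: pvColl cakes i j)
    (List.replicate (PySem.List.len cakes).toNat PySem.Set.empty) hrs_nodup hrs_bd
  have hmem_rs : ∀ a : Int, 0 ≤ a → a < (cakes.length : Int) → a ∈ i :: j :: pvColl cakes i j := by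
    intro a h0 hn
    by_cases hai : a = i
    · simp [hai]
    by_cases haj : a = j
    · simp [haj]
    · refine List.mem_cons_of_mem _ (List.mem_cons_of_mem _ ((mem_coll _ _ _ _).mpr
        ⟨h0, hn, by tauto, ?_⟩))
      rw [vconst cakes hall i hi0 (by omega), vconst cakes hall j (by omega) hjn,
        orient_degenerate]
  have hget0 : ∀ a : Int, 0 ≤ a → a < (cakes.length : Int) →
      (0 : Int) ∈ PySem.List.pyGetD ((i :: j :: pvColl cakes i j).foldl
        (fun acc r => PySem.List.pySetD acc r
          (PySem.Set.add (PySem.List.pyGetD acc r PySem.Set.empty) 0))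
        (List.replicate (PySem.List.len cakes).toNat PySem.Set.empty)) a PySem.Set.empty := by
    intro a h0 hn
    rw [hget3 a h0 (by rw [hreplen]; exact hn), if_pos (hmem_rs a h0 hn), hrepget a h0 hn]
    exact (PySem.Set.mem_add _ _ _).mpr (Or.inr rfl)
  have hskip : ∀ e ∈ xs,
      PySem.List.pyGetD ((i :: j :: pvColl cakes i j).foldl
        (fun acc r => PySem.List.pySetD acc r
          (PySem.Set.add (PySem.List.pyGetD acc r PySem.Set.empty) 0))
        (List.replicate (PySem.List.len cakes).toNat (PySem.Set.empty : PySem.Set Int)))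
        e.1.1 PySem.Set.empty ≠ PySem.Set.empty ∧
      PySem.List.pyGetD ((i :: j :: pvColl cakes i j).foldl
        (fun acc r => PySem.List.pySetD acc r
          (PySem.Set.add (PySem.List.pyGetD acc r PySem.Set.empty) 0))
        (List.replicate (PySem.List.len cakes).toNat (PySem.Set.empty : PySem.Set Int)))
        e.1.2 PySem.Set.empty ≠ PySem.Set.empty ∧
      PySem.Set.inter
        (PySem.List.pyGetD ((i :: j :: pvColl cakes i j).foldl
          (fun acc r => PySem.List.pySetD acc r
            (PySem.Set.add (PySem.List.pyGetD acc r PySem.Set.empty) 0))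
          (List.replicate (PySem.List.len cakes).toNat (PySem.Set.empty : PySem.Set Int)))
          e.1.1 PySem.Set.empty)
        (PySem.List.pyGetD ((i :: j :: pvColl cakes i j).foldl
          (fun acc r => PySem.List.pySetD acc r
            (PySem.Set.add (PySem.List.pyGetD acc r PySem.Set.empty) 0))
          (List.replicate (PySem.List.len cakes).toNat (PySem.Set.empty : PySem.Set Int)))
          e.1.2 PySem.Set.empty)
        ≠ PySem.Set.empty := by
    intro e he
    have hmem : e ∈ pvSegments cakes := by rw [hxeq]; simp [he]
    rw [segments_eq] at hmem
    obtain ⟨s, hs, rfl⟩ := List.mem_map.mp hmem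
    obtain ⟨h0, hlt, hn⟩ := (mem_comb2 _ s).mp (List.mem_filter.mp hs).1
    rw [PySem.List.len_eq] at hn
    have hgi := hget0 s.1 h0 (by omega)
    have hgj := hget0 s.2 (by omega) hn
    exact ⟨List.ne_nil_of_mem hgi, List.ne_nil_of_mem hgj,
      List.ne_nil_of_mem ((PySem.Set.mem_inter _ _ _).mpr ⟨hgi, hgj⟩)⟩
  exact (congrArg Prod.fst (all_skip xs ((0 : Int) + 1,
    (i :: j :: pvColl cakes i j).foldl
      (fun acc r => PySem.List.pySetD acc r
        (PySem.Set.add (PySem.List.pyGetD acc r PySem.Set.empty) 0))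
      (List.replicate (PySem.List.len cakes).toNat (PySem.Set.empty : PySem.Set Int)))
    hskip)).trans rfl

theorem checkio_spec : Claim_unchanged_checkio := by
  intro cakes _ hD
  show checkio cakes = checkio_alt cakes
  -- from ¬ D_: whenever there are ≥ 3 cakes, some cake differs from any given one
  have hOdd : (3:Int) ≤ (cakes.length : Int) → ∀ i : Int, 0 ≤ i → i < (cakes.length : Int) →
      ∃ w : Int, 0 ≤ w ∧ w < (cakes.length : Int) ∧ pvV cakes w ≠ pvV cakes i := by
    intro hn3 i hi0 hin
    have hne : ∃ p ∈ cakes, p ≠ cakes.getD 0 (0, 0) := by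
      by_contra hc
      push Not at hc
      exact hD ⟨by exact_mod_cast hn3, hc⟩
    obtain ⟨p, hp, hpne⟩ := hne
    obtain ⟨k, hk, hke⟩ := List.mem_iff_getElem.mp hp
    have hV0 : pvV cakes 0 = cakes.getD 0 (0, 0) := by
      rw [pvV, PySem.List.pyGetD_eq_getElem _ _ le_rfl (by omega)]
      rw [List.getD_eq_getElem _ _ (by omega)]
      rfl
    have hVk : pvV cakes (k : Int) = p := by
      rw [pvV, PySem.List.pyGetD_eq_getElem _ _ (by omega) (by exact_mod_cast hk)]
      simpa using hke
    by_cases hvi : pvV cakes i = cakes.getD 0 (0, 0)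
    · exact ⟨(k : Int), by omega, by exact_mod_cast hk, by rw [hVk, hvi]; exact hpne⟩
    · exact ⟨0, le_rfl, by omega, by rw [hV0]; exact fun h => hvi h.symm⟩
  -- run the greedy loop through pvGreedy, starting from no counted rows
  obtain ⟨C2, h1, h2, h3⟩ := pvGreedy cakes hOdd
    (PySem.List.sorted (pvSegments cakes) (fun x => x.2.1) true) []
    (List.replicate (PySem.List.len cakes).toNat PySem.Set.empty)
    (by
      intro e he
      rw [PySem.List.mem_sorted] at he
      rw [segments_eq] at he
      obtain ⟨s, hs, rfl⟩ := List.mem_map.mp he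
      obtain ⟨hsc, hpred⟩ := List.mem_filter.mp hs
      obtain ⟨h0, hlt, hn⟩ := (mem_comb2 _ s).mp hsc
      exact ⟨s.1, s.2, h0, hlt, hn, rfl, of_decide_eq_true hpred⟩)
    (PySem.List.sorted_pairwise_rev _ _)
    List.nodup_nil
    (by intro X hX; exact absurd hX (List.not_mem_nil))
    (by
      intro i j hv habs
      exfalso
      apply habs
      rw [PySem.List.mem_sorted, segments_eq]
      exact List.mem_map.mpr ⟨(i, j), List.mem_filter.mpr
        ⟨(mem_comb2 _ (i, j)).mpr ⟨hv.1, hv.2.1, hv.2.2.1⟩,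
          decide_eq_true hv.2.2.2.2⟩, rfl⟩)
    (by simp)
    (by
      intro a c ha0 han
      rw [PySem.List.pyGetD_eq_getElem _ _ ha0 (by simp; omega)]
      simp)
  have hA : checkio cakes = (C2.length : Int) := h1
  rw [hA, alt_eq]
  congr 1
  have hno : (PySem.Set.ofList (pvCand cakes)).Nodup := PySem.Set.nodup_ofList _
  have hmm : ∀ X, X ∈ C2 ↔ X ∈ PySem.Set.ofList (pvCand cakes) := by
    intro X
    rw [h3 X, mem_ofList_cand]
  have hfin : C2.toFinset = (PySem.Set.ofList (pvCand cakes)).toFinset := by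
    ext X
    simp only [List.mem_toFinset]
    exact hmm X
  rw [← List.toFinset_card_of_nodup h2, ← List.toFinset_card_of_nodup hno, hfin]

theorem checkio_changed : Claim_changed_checkio := by
  unfold Claim_changed_checkio; decide

theorem checkio_tight : Claim_exact_checkio := by
  intro cakes _ hDd
  obtain ⟨h3, hall⟩ := hDd
  rw [deg_A cakes h3 hall, deg_B cakes hall]
  decide
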